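-- pv_equiv track=rewrite | github.com/SonJinHYo/CodingTest | 프로그래머스/lv2/131704. 택배상자/택배상자.py | solution
-- ===== SOURCE A (Python) =====
-- def solution(order):
--     """오더가 벨트 또는 현재 박스번호와 같을 때 까지 or 박스 번호 다 체크할 때 까지 반복
--     박스번호와 같은 경우
--         다음 오더
--         박스 다음 박스 번호
--     박스 번호와 다르고 벨트와 같은 경우
--         벨트에서 pop
--         다음 오더
--     박스 번호, 벨트 다 다른 경우
--         현재 박스를 벨트에 append
--         다음 박스
--     """
--     answer = 0
--     belt = [-1]
--     box_num = 1
--     N = len(order)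
--     order = order[::-1]
--     while order and (order[-1] == box_num or order[-1] == belt[-1] or box_num <= N):
--         if order[-1] == box_num:
--             box_num+=1
--             answer+=1
--             order.pop()
--         elif order[-1] == belt[-1]:
--                 answer+=1
--                 belt.pop()
--                 order.pop()
--         else:
--             belt.append(box_num)
--             box_num+=1
--     return answer
-- ===== SOURCE B (Python) =====
-- def solution(order):
--     answer = 0
--     stack = []
--     box = 1
--     n = len(order)
--     for want in order:
--         while box <= n and want != box and (not stack or want != stack[-1]):
--             stack.append(box)
--             box += 1
--         if want == box:
--             box += 1
--             answer += 1
--         elif stack and want == stack[-1]: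
--             stack.pop()
--             answer += 1
--         else:
--             break
--     return answer
-- ===== Notes on version B (the rewrite author's own statement) =====
-- stated objective: simpler
-- what changed: Replaced A's flat while-loop over a reversed copy of order with a [-1]-sentinel belt by a plain forward for-loop over order with a nested push-while and an ordinary stack (no list reversal/copy, no pop-from-end bookkeeping, no sentinel).
-- outside the precondition, e.g. on solution([-1]): A returns 1, B returns 0; on solution([-1, 5]): A raises IndexError, B returns 0
import Mathlib
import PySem

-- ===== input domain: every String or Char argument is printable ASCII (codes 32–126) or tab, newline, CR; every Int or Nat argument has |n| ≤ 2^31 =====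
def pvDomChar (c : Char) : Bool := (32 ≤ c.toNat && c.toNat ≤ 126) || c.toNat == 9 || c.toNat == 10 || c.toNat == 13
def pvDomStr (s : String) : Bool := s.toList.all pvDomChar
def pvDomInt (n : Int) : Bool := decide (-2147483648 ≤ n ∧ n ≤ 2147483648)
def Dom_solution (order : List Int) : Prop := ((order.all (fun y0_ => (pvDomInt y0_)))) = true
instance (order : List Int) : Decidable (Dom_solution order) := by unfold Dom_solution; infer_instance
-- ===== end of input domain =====

-- B replaces A's flat while-loop over a reversed copy with a sentinel belt by a forward
-- for-loop with a nested push-while over a plain stack (simpler; no reversal/copy).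

-- ===== PORT A =====
-- The while loop of A: state (answer, belt, box_num, ord) with ord the reversed order,
-- read and popped from the end (order[-1] / order.pop()), exactly as the Python does.
def solLoopA (N answer : Int) (belt : List Int) (box : Int) (ord : List Int) : Int :=
  match hlast : PySem.List.pyGet? ord (-1) with
  | none => answer                    -- `while order` fails: order is empty
  | some last =>                      -- last = order[-1]
    if last = box then
      solLoopA N (answer + 1) belt (box + 1) ord.dropLast
    else if PySem.List.pyGet? belt (-1) = some last then
      solLoopA N (answer + 1) belt.dropLast box ord.dropLast
    else if box ≤ N then
      solLoopA N answer (belt ++ [box]) (box + 1) ord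
    else answer                       -- all three disjuncts of the while condition fail
termination_by ord.length + (N + 1 - box).toNat
decreasing_by
  · have hne : ord ≠ [] := by
      intro h; subst h; simp [PySem.List.pyGet?, PySem.List.pyIdx?] at hlast
    have := List.length_pos_of_ne_nil hne
    simp [List.length_dropLast]; omega
  · have hne : ord ≠ [] := by
      intro h; subst h; simp [PySem.List.pyGet?, PySem.List.pyIdx?] at hlast
    have := List.length_pos_of_ne_nil hne
    simp [List.length_dropLast]; omega
  · omega

def solution (order : List Int) : Int :=
  solLoopA (order.length : Int) 0 [-1] 1
    ((PySem.List.slice? order none none (-1)).getD [])   -- order[::-1]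

-- ===== PORT B =====
-- inner `while box <= n and want != box and (not stack or want != stack[-1])`
def innerB (n want : Int) (stack : List Int) (box : Int) : List Int × Int :=
  if h : box ≤ n ∧ want ≠ box ∧ (stack = [] ∨ stack.getLast? ≠ some want) then
    innerB n want (stack ++ [box]) (box + 1)
  else (stack, box)
termination_by (n + 1 - box).toNat
decreasing_by omega

-- outer `for want in order` with early break
def outerB (n : Int) (stack : List Int) (box answer : Int) : List Int → Int
  | [] => answer
  | want :: rest =>
    match innerB n want stack box with
    | (s, b) =>
      if want = b then outerB n s (b + 1) (answer + 1) rest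
      else if s ≠ [] ∧ s.getLast? = some want then outerB n s.dropLast b (answer + 1) rest
      else answer

def solution_alt (order : List Int) : Int :=
  outerB (order.length : Int) [] 1 0 order

-- ===== PRECONDITION & SPEC =====
-- Pre_ excludes orders containing -1: on those A's [-1] belt sentinel accidentally matches
-- the ordered value, so A raises IndexError (e.g. [-1, 5]) or counts -1 as a delivered box
-- (e.g. [-1] -> 1); B does the natural thing and never ships -1.
def Pre_solution (order : List Int) : Prop := (-1 : Int) ∉ order
instance (order : List Int) : Decidable (Pre_solution order) := by unfold Pre_solution; infer_instance
def pvWitness_solution : List Int := [2, 1, 3]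

def Spec_solution (order : List Int) (out : Int) : Prop := out = solution_alt order
instance (order : List Int) (out : Int) : Decidable (Spec_solution order out) := by unfold Spec_solution; infer_instance

-- ===== CLAIM (what is proved, stated in full; the proofs are below) =====
def Claim_equal_solution : Prop := ∀ (order : List Int), Dom_solution order → Pre_solution order → Spec_solution order (solution order)

-- ===== LEMMAS AND PROOFS =====

lemma solLoopA_nil (N answer : Int) (belt : List Int) (box : Int) :
    solLoopA N answer belt box [] = answer := by
  rw [solLoopA]
  split
  · rfl
  · next last heq => simp [PySem.List.pyGet?, PySem.List.pyIdx?] at heq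

lemma loopA_eq_outerB : ∀ (m : Nat) (N : Int) (rest stack : List Int) (box answer : Int),
    rest.length + (N + 1 - box).toNat ≤ m → (-1 : Int) ∉ rest →
    solLoopA N answer ((-1) :: stack) box rest.reverse = outerB N stack box answer rest := by
  intro m
  induction m with
  | zero =>
    intro N rest stack box answer hm h
    have hnil : rest = [] := by cases rest with
      | nil => rfl
      | cons a l => simp at hm
    subst hnil
    rw [List.reverse_nil, solLoopA_nil, outerB]
  | succ m ih =>
    intro N rest stack box answer hm h
    cases rest with
    | nil => rw [List.reverse_nil, solLoopA_nil, outerB]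
    | cons o r =>
      have ho1 : o ≠ -1 := fun he => h (by simp [he])
      have hr : (-1 : Int) ∉ r := fun he => h (by simp [he])
      have hlast : PySem.List.pyGet? ((o :: r).reverse) (-1) = some o := by
        simp [PySem.List.pyGet?_neg_one]
      have hdrop : ((o :: r).reverse).dropLast = r.reverse := by
        simp [List.reverse_cons]
      have hbeltlast : PySem.List.pyGet? ((-1 : Int) :: stack) (-1)
          = (if stack = [] then some (-1) else stack.getLast?) := by
        cases stack with
        | nil => simp [PySem.List.pyGet?_neg_one]
        | cons a l => simp [PySem.List.pyGet?_neg_one, List.getLast?_cons]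
      rw [solLoopA]
      split
      · next heq => rw [hlast] at heq; exact absurd heq (by simp)
      · next last heq =>
        rw [hlast] at heq
        cases heq
        simp at hm
        by_cases hob : o = box
        · -- ordered box is the current box number
          rw [if_pos hob, hdrop]
          rw [ih N r stack (box + 1) (answer + 1) (by omega) hr]
          rw [outerB, innerB]
          simp [hob]
        · by_cases hst : stack.getLast? = some o
          · -- ordered box is on top of the belt
            have hsne : stack ≠ [] := by
              intro hnil; rw [hnil] at hst; simp at hst
            have hcond : PySem.List.pyGet? ((-1 : Int) :: stack) (-1) = some o := by
              rw [hbeltlast, if_neg hsne]; exact hst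
            rw [if_neg hob, if_pos hcond]
            have hdropbelt : ((-1 : Int) :: stack).dropLast = (-1 : Int) :: stack.dropLast := by
              cases stack with
              | nil => exact absurd rfl hsne
              | cons a l => rfl
            rw [hdrop, hdropbelt]
            rw [ih N r stack.dropLast box (answer + 1) (by omega) hr]
            rw [outerB, innerB]
            simp [hob, hsne, hst]
          · -- no match
            have hcond : ¬ PySem.List.pyGet? ((-1 : Int) :: stack) (-1) = some o := by
              rw [hbeltlast]
              split_ifs with hnil
              · intro he
                exact ho1 (by injection he with h'; exact h'.symm)
              · exact fun he => hst he
            by_cases hN : box ≤ N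
            · -- push the current box onto the belt
              rw [if_neg hob, if_neg hcond, if_pos hN]
              have hcons : ((-1 : Int) :: stack) ++ [box] = (-1 : Int) :: (stack ++ [box]) := rfl
              rw [hcons]
              have hm' : (o :: r).length + (N + 1 - (box + 1)).toNat ≤ m := by simp; omega
              rw [ih N (o :: r) (stack ++ [box]) (box + 1) answer hm' h]
              rw [outerB, outerB]
              rw [show innerB N o stack box = innerB N o (stack ++ [box]) (box + 1) from by
                rw [innerB]
                simp [hN, hob, hst]]
            · -- the while condition fails: both sides stop
              rw [if_neg hob, if_neg hcond, if_neg hN]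
              rw [outerB, innerB]
              have hc : ¬ (box ≤ N ∧ o ≠ box ∧ (stack = [] ∨ stack.getLast? ≠ some o)) :=
                fun hc => hN hc.1
              rw [dif_neg hc]
              simp [hob, hst]

-- ===== VERDICT (by name: the statement is the Claim_ definition above) =====
theorem solution_spec : Claim_equal_solution := by
  intro order _ hpre
  unfold Spec_solution solution solution_alt
  rw [PySem.List.slice?_none_none_neg_one, Option.getD_some]
  exact loopA_eq_outerB (order.length + (((order.length : Int) + 1 - 1).toNat)) _ order [] 1 0
    (by omega) hpre
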